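-- pv_equiv track=rewrite | github.com/Tch1993/collection | function.py | data_repeat
-- ===== SOURCE A (Python) =====
-- def data_repeat(data):	#重复的数据分离
-- 	arr = [];
-- 	arr_data = [];
-- 	arr_repeat = [];
-- 	for v in data:
-- 		arr.append(v);
-- 	for v in arr:
-- 		if v not in arr_data:
-- 			arr_data.append(v);
-- 		elif v not in arr_repeat:
-- 			arr_repeat.append(v);
-- 	return arr_data, arr_repeat;
-- ===== SOURCE B (Python) =====
-- def data_repeat(data):
--     # Stateless positional characterization: data[i] belongs to the unique list iff it
--     # does not occur earlier (first occurrence), and to the repeat list iff it occurs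
--     # exactly once earlier (second occurrence). Two declarative filters over positions,
--     # no mutable classifier state or output-list membership tests.
--     arr_data = [v for i, v in enumerate(data) if v not in data[:i]]
--     arr_repeat = [v for i, v in enumerate(data) if data[:i].count(v) == 1]
--     return arr_data, arr_repeat
-- ===== Notes on version B (the rewrite author's own statement) =====
-- stated objective: simpler
-- what changed: B drops A's copy loop and stateful classify-by-output-membership loop and instead characterizes each position declaratively: two comprehensions keep data[i] when it is absent from data[:i] (unique) or occurs exactly once in data[:i] (second occurrence), so no accumulator is consulted.
import Mathlib
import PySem

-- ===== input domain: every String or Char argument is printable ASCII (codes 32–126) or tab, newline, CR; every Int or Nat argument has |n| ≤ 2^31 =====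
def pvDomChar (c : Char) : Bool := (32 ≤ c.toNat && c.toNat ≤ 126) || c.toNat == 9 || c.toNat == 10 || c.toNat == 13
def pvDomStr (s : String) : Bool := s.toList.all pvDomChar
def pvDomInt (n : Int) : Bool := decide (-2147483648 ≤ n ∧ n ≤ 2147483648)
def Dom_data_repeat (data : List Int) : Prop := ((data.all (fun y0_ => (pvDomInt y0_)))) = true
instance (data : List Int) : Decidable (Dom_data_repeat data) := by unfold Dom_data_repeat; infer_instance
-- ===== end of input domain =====

-- B replaces A's stateful classify loop by two declarative prefix-property filters
-- (keep data[i] iff absent from / exactly once in data[:i]); same return value, proved below.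

-- ===== PORT A =====
-- A's classify-loop body: append to arr_data on first sight, else to arr_repeat on second sight
def stepA (st : List Int × List Int) (v : Int) : List Int × List Int :=
  if v ∉ st.1 then (st.1 ++ [v], st.2)
  else if v ∉ st.2 then (st.1, st.2 ++ [v])
  else st

def data_repeat (data : List Int) : List Int × List Int :=
  let arr : List Int := data.foldl (fun a v => a ++ [v]) []
  arr.foldl stepA ([], [])

-- ===== PORT B =====
def data_repeat_alt (data : List Int) : List Int × List Int :=
  (((PySem.List.enumerate data).filter
      (fun p => !decide (p.2 ∈ PySem.List.slice data none (some p.1)))).map (·.2),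
   ((PySem.List.enumerate data).filter
      (fun p => PySem.List.count (PySem.List.slice data none (some p.1)) p.2 == 1)).map (·.2))

-- ===== PRECONDITION & SPEC =====
def Spec_data_repeat (data : List Int) (out : List Int × List Int) : Prop := out = data_repeat_alt data
instance (data : List Int) (out : List Int × List Int) : Decidable (Spec_data_repeat data out) := by unfold Spec_data_repeat; infer_instance

-- ===== CLAIM (what is proved, stated in full; the proofs are below) =====
def Claim_equal_data_repeat : Prop := ∀ (data : List Int), Dom_data_repeat data → Spec_data_repeat data (data_repeat data)

-- ===== LEMMAS AND PROOFS =====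

-- the two components of B's result, as functions (definitional unfoldings of the port)
def F1 (data : List Int) : List Int :=
  ((PySem.List.enumerate data).filter
      (fun p => !decide (p.2 ∈ PySem.List.slice data none (some p.1)))).map (·.2)

def F2 (data : List Int) : List Int :=
  ((PySem.List.enumerate data).filter
      (fun p => PySem.List.count (PySem.List.slice data none (some p.1)) p.2 == 1)).map (·.2)

theorem alt_eq (data : List Int) : data_repeat_alt data = (F1 data, F2 data) := rfl

-- the filter predicates only look at the prefix before the position
theorem filter_enum_append (q : Int → List Int → Bool) (pre : List Int) (x : Int) :
    (PySem.List.enumerate (pre ++ [x])).filter (fun p => q p.2 (PySem.List.slice (pre ++ [x]) none (some p.1)))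
    = (PySem.List.enumerate pre).filter (fun p => q p.2 (PySem.List.slice pre none (some p.1)))
      ++ (if q x pre then [((pre.length : Int), x)] else []) := by
  rw [PySem.List.enumerate_append]
  rw [List.filter_append]
  congr 1
  · apply List.filter_congr
    intro p hp
    rcases (PySem.List.mem_enumerate_iff _ _ _).mp hp with ⟨k, hk, rfl⟩
    have h0 : ((0 : Int) + k) = (k : Int) := by omega
    rw [h0, PySem.List.slice_to_natCast, PySem.List.slice_to_natCast,
        List.take_append_of_le_length (le_of_lt hk)]
  · simp only [PySem.List.enumerate_cons, PySem.List.enumerate_nil]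
    have h0 : ((0 : Int) + (pre.length : Int)) = (pre.length : Int) := by omega
    simp only [h0, List.filter, PySem.List.slice_to_natCast, List.take_left]
    by_cases hq : q x pre <;> simp [hq]

theorem F1_append (pre : List Int) (x : Int) :
    F1 (pre ++ [x]) = F1 pre ++ (if x ∈ pre then [] else [x]) := by
  unfold F1
  rw [filter_enum_append (fun v l => !decide (v ∈ l)) pre x]
  rw [List.map_append]
  by_cases hx : x ∈ pre <;> simp [hx]

theorem F2_append (pre : List Int) (x : Int) :
    F2 (pre ++ [x]) = F2 pre ++ (if pre.count x = 1 then [x] else []) := by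
  unfold F2
  rw [filter_enum_append (fun v l => PySem.List.count l v == 1) pre x]
  rw [List.map_append]
  by_cases hx : pre.count x = 1 <;> simp [PySem.List.count_eq, hx]

theorem mem_F1 (pre : List Int) (v : Int) : v ∈ F1 pre ↔ v ∈ pre := by
  induction pre using List.reverseRecOn with
  | nil => simp [F1, PySem.List.enumerate_nil]
  | append_singleton l x ih =>
    rw [F1_append]
    by_cases hx : x ∈ l
    · simp only [hx, if_true]
      simp only [List.append_nil, List.mem_append, List.mem_singleton, ih]
      constructor
      · exact Or.inl
      · rintro (h | rfl) <;> [exact h; exact hx]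
    · simp [hx, ih]

theorem mem_F2 (pre : List Int) (v : Int) : v ∈ F2 pre ↔ 2 ≤ pre.count v := by
  induction pre using List.reverseRecOn with
  | nil => simp [F2, PySem.List.enumerate_nil]
  | append_singleton l x ih =>
    rw [F2_append, List.count_append]
    by_cases hvx : v = x
    · subst hvx
      have hone : List.count v [v] = 1 := by simp
      rw [hone]
      by_cases h1 : l.count v = 1
      · simp [h1, ih]
      · simp only [h1, if_false, List.append_nil, ih]
        omega
    · have hz : List.count v [x] = 0 := by
        simp only [List.count_singleton, beq_iff_eq]
        simp only [ite_eq_right_iff]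
        exact fun h => absurd h.symm hvx
      rw [hz]
      by_cases h1 : l.count x = 1 <;> simp [h1, ih, hvx]

theorem foldl_stepA_eq (l : List Int) : l.foldl stepA ([], []) = (F1 l, F2 l) := by
  induction l using List.reverseRecOn with
  | nil => simp [F1, F2, PySem.List.enumerate_nil]
  | append_singleton pre x ih =>
    rw [List.foldl_append, ih, List.foldl_cons, List.foldl_nil,
        F1_append, F2_append]
    by_cases hmem : x ∈ pre
    · have hc1 : 1 ≤ pre.count x := List.one_le_count_iff.mpr hmem
      by_cases h2 : 2 ≤ pre.count x
      · -- already repeated: A leaves the state unchanged, both filters empty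
        have : stepA (F1 pre, F2 pre) x = (F1 pre, F2 pre) := by
          simp [stepA, (mem_F1 pre x).mpr hmem, (mem_F2 pre x).mpr h2]
        rw [this]
        have hne : ¬ pre.count x = 1 := by omega
        simp [hmem, hne]
      · -- second sight
        have hc : pre.count x = 1 := by omega
        have : stepA (F1 pre, F2 pre) x = (F1 pre, F2 pre ++ [x]) := by
          simp [stepA, (mem_F1 pre x).mpr hmem, mem_F2, hc]
        rw [this]
        simp [hmem, hc]
    · -- first sight
      have hc0 : pre.count x = 0 := List.count_eq_zero.mpr hmem
      have : stepA (F1 pre, F2 pre) x = (F1 pre ++ [x], F2 pre) := by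
        simp [stepA, mem_F1, hmem]
      rw [this]
      simp [hmem, hc0]

-- ===== VERDICT (by name: the statement is the Claim_ definition above) =====
theorem data_repeat_spec : Claim_equal_data_repeat := by
  intro data _
  unfold Spec_data_repeat data_repeat
  have harr : data.foldl (fun a v => a ++ [v]) [] = data := by
    simpa using PySem.List.foldl_append_singleton data []
  rw [alt_eq]
  simp only [harr]
  exact foldl_stepA_eq data
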